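-- pv_equiv track=rewrite | github.com/DeadCoder-N/root | security-toolkit/tool-10-ssl-tls-scanner/backend/app.py | add_fix_prompts
-- ===== SOURCE A (Python) =====
-- def add_fix_prompts(vulnerabilities):
--     """Add actionable fix prompts to vulnerabilities"""
--     for vuln in vulnerabilities:
--         vuln_type = vuln.get('type', '')
--
--         if 'Expired Certificate' in vuln_type:
--             vuln['fix_prompt'] = "Renew SSL certificate immediately. Use Let's Encrypt for free auto-renewal. Set up monitoring for expiration alerts."
--         elif 'Weak Protocol' in vuln_type:
--             vuln['fix_prompt'] = "Disable SSLv2, SSLv3, TLS 1.0, TLS 1.1. Enable only TLS 1.2 and TLS 1.3. Update server configuration."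
--         elif 'Weak Cipher' in vuln_type:
--             vuln['fix_prompt'] = "Disable weak ciphers (RC4, DES, 3DES, MD5). Use strong ciphers: AES-GCM, ChaCha20. Configure cipher suite order."
--         elif 'Self-Signed' in vuln_type:
--             vuln['fix_prompt'] = "Replace self-signed certificate with CA-signed certificate. Use Let's Encrypt for free trusted certificates."
--         else:
--             vuln['fix_prompt'] = f"Review and fix {vuln_type}. Test with SSL Labs: ssllabs.com/ssltest"
--
--     return vulnerabilities
-- ===== SOURCE B (Python) =====
-- RULES = [
--     ("Expired Certificate", "Renew SSL certificate immediately. Use Let's Encrypt for free auto-renewal. Set up monitoring for expiration alerts."),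
--     ("Weak Protocol", "Disable SSLv2, SSLv3, TLS 1.0, TLS 1.1. Enable only TLS 1.2 and TLS 1.3. Update server configuration."),
--     ("Weak Cipher", "Disable weak ciphers (RC4, DES, 3DES, MD5). Use strong ciphers: AES-GCM, ChaCha20. Configure cipher suite order."),
--     ("Self-Signed", "Replace self-signed certificate with CA-signed certificate. Use Let's Encrypt for free trusted certificates."),
-- ]
--
-- def add_fix_prompts(vulnerabilities):
--     """Staged overwrite passes: give every vuln the default prompt, then run one
--     pass per rule in REVERSE priority order, overwriting fix_prompt wherever the
--     keyword matches; the last (highest-priority) matching pass wins."""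
--     for vuln in vulnerabilities:
--         vuln['fix_prompt'] = "Review and fix {}. Test with SSL Labs: ssllabs.com/ssltest".format(vuln.get('type', ''))
--     for keyword, prompt in reversed(RULES):
--         for vuln in vulnerabilities:
--             if keyword in vuln.get('type', ''):
--                 vuln['fix_prompt'] = prompt
--     return vulnerabilities
-- ===== Notes on version B (the rewrite author's own statement) =====
-- stated objective: alternative
-- what changed: Instead of a per-item first-match if/elif chain, B first assigns every vuln the default prompt and then runs one whole-list overwrite pass per rule in reverse priority order, so the last matching pass (highest priority) wins.
import Mathlib
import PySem

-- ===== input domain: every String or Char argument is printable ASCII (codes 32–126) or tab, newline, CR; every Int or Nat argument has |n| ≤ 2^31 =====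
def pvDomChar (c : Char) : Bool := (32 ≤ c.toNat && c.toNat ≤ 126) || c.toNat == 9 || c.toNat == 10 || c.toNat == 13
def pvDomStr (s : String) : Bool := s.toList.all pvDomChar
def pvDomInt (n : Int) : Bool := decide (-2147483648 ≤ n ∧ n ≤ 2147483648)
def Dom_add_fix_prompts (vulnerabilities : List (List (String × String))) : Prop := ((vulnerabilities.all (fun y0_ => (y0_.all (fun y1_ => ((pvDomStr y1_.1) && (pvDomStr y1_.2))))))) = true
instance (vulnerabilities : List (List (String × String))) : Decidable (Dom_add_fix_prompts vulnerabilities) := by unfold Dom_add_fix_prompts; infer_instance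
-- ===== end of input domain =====

-- B replaces the per-item first-match if/elif chain by staged passes: every vuln first gets the
-- default prompt, then one whole-list overwrite pass per rule in reverse priority order (alternative;
-- same cost). A (and B) mutate the input dicts in place; equivalence here is about the returned value.

-- ===== PORT A =====
-- one iteration of A's loop body: the if/elif chain on vuln_type
def pvFixOneA (vuln : List (String × String)) : List (String × String) :=
  let d := PySem.Dict.mk vuln
  let vuln_type := PySem.Dict.getD d "type" ""
  (if PySem.Str.isIn "Expired Certificate" vuln_type then
    PySem.Dict.insert d "fix_prompt" "Renew SSL certificate immediately. Use Let's Encrypt for free auto-renewal. Set up monitoring for expiration alerts."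
  else if PySem.Str.isIn "Weak Protocol" vuln_type then
    PySem.Dict.insert d "fix_prompt" "Disable SSLv2, SSLv3, TLS 1.0, TLS 1.1. Enable only TLS 1.2 and TLS 1.3. Update server configuration."
  else if PySem.Str.isIn "Weak Cipher" vuln_type then
    PySem.Dict.insert d "fix_prompt" "Disable weak ciphers (RC4, DES, 3DES, MD5). Use strong ciphers: AES-GCM, ChaCha20. Configure cipher suite order."
  else if PySem.Str.isIn "Self-Signed" vuln_type then
    PySem.Dict.insert d "fix_prompt" "Replace self-signed certificate with CA-signed certificate. Use Let's Encrypt for free trusted certificates."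
  else
    PySem.Dict.insert d "fix_prompt" ("Review and fix " ++ vuln_type ++ ". Test with SSL Labs: ssllabs.com/ssltest")).items

def add_fix_prompts (vulnerabilities : List (List (String × String))) : List (List (String × String)) :=
  vulnerabilities.map pvFixOneA

-- ===== PORT B =====
-- Source B's RULES, in priority order
def pvRules : List (String × String) :=
  [("Expired Certificate", "Renew SSL certificate immediately. Use Let's Encrypt for free auto-renewal. Set up monitoring for expiration alerts."),
   ("Weak Protocol", "Disable SSLv2, SSLv3, TLS 1.0, TLS 1.1. Enable only TLS 1.2 and TLS 1.3. Update server configuration."),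
   ("Weak Cipher", "Disable weak ciphers (RC4, DES, 3DES, MD5). Use strong ciphers: AES-GCM, ChaCha20. Configure cipher suite order."),
   ("Self-Signed", "Replace self-signed certificate with CA-signed certificate. Use Let's Encrypt for free trusted certificates.")]

-- Source B's first loop: assign everyone the default prompt
def pvDefaultPass (vs : List (List (String × String))) : List (List (String × String)) :=
  vs.map (fun v =>
    let d := PySem.Dict.mk v
    (PySem.Dict.insert d "fix_prompt"
      ("Review and fix " ++ PySem.Dict.getD d "type" "" ++ ". Test with SSL Labs: ssllabs.com/ssltest")).items)

-- the body of Source B's inner loop: overwrite fix_prompt if the keyword matches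
def pvStep (r : String × String) (v : List (String × String)) : List (String × String) :=
  let d := PySem.Dict.mk v
  if PySem.Str.isIn r.1 (PySem.Dict.getD d "type" "") then
    (PySem.Dict.insert d "fix_prompt" r.2).items
  else v

-- one inner pass of Source B's second loop
def pvRulePass (r : String × String) (vs : List (List (String × String))) : List (List (String × String)) :=
  vs.map (pvStep r)

def add_fix_prompts_alt (vulnerabilities : List (List (String × String))) : List (List (String × String)) :=
  pvRules.reverse.foldl (fun vs r => pvRulePass r vs) (pvDefaultPass vulnerabilities)
-- ===== PRECONDITION & SPEC =====
def Spec_add_fix_prompts (vulnerabilities : List (List (String × String))) (out : List (List (String × String))) : Prop := out = add_fix_prompts_alt vulnerabilities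
instance (vulnerabilities : List (List (String × String))) (out : List (List (String × String))) : Decidable (Spec_add_fix_prompts vulnerabilities out) := by unfold Spec_add_fix_prompts; infer_instance

-- ===== CLAIM (what is proved, stated in full; the proofs are below) =====
def Claim_equal_add_fix_prompts : Prop := ∀ (vulnerabilities : List (List (String × String))), Dom_add_fix_prompts vulnerabilities → Spec_add_fix_prompts vulnerabilities (add_fix_prompts vulnerabilities)

-- ===== LEMMAS AND PROOFS =====

-- overwriting the same key twice = overwriting it once (at the items level)
theorem pv_insert_insert (d : PySem.Dict String String) (k a b : String) :
    ((d.insert k a).insert k b).items = (d.insert k b).items := by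
  by_cases h : d.contains k = true
  · rw [PySem.Dict.items_insert_of_contains _ _ (PySem.Dict.contains_insert_self d k a),
        PySem.Dict.items_insert_of_contains _ _ h,
        PySem.Dict.items_insert_of_contains _ _ h, List.map_map]
    refine List.map_congr_left (fun p _ => ?_)
    by_cases hp : p.1 = k <;> simp [hp]
  · have h' : d.contains k = false := by simpa using h
    rw [PySem.Dict.items_insert_of_contains _ _ (PySem.Dict.contains_insert_self d k a),
        PySem.Dict.items_insert_of_not_contains _ _ h',
        PySem.Dict.items_insert_of_not_contains _ _ h', List.map_append]
    congr 1
    · refine (List.map_congr_left (fun p hp => ?_)).trans (List.map_id _)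
      have hk : d.contains p.1 = true := (PySem.Dict.contains_iff_mem_keys _ _).mpr
        (by simp only [PySem.Dict.keys]; exact List.mem_map_of_mem hp)
      have hne : (p.1 == k) = false := by
        by_contra hb
        simp only [Bool.not_eq_false] at hb
        rw [eq_of_beq hb] at hk; rw [hk] at h'; cases h'
      simp [hne]
    · simp

-- inserting fix_prompt does not change the type field
theorem pv_getD_type (d : PySem.Dict String String) (x : String) :
    (d.insert "fix_prompt" x).getD "type" "" = d.getD "type" "" :=
  PySem.Dict.getD_insert_of_ne _ _ _ (by decide)

-- one overwrite step on an already-overwritten element folds into the pending value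
theorem pv_step (d : PySem.Dict String String) (kw p x : String) :
    pvStep (kw, p) ((d.insert "fix_prompt" x).items)
      = (d.insert "fix_prompt" (if PySem.Str.isIn kw (d.getD "type" "") then p else x)).items := by
  show (if PySem.Str.isIn kw ((d.insert "fix_prompt" x).getD "type" "") then
          ((d.insert "fix_prompt" x).insert "fix_prompt" p).items
        else (d.insert "fix_prompt" x).items) = _
  rw [pv_getD_type]
  by_cases h : PySem.Str.isIn kw (d.getD "type" "") = true
  · rw [if_pos h, if_pos h, pv_insert_insert]
  · rw [if_neg h, if_neg h]

-- a fold of element-wise passes distributes over cons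
theorem pv_pass_cons (rs : List (String × String)) (x : List (String × String)) (xs : List (List (String × String))) :
    rs.foldl (fun vs r => pvRulePass r vs) (x :: xs)
      = rs.foldl (fun v r => pvStep r v) x :: rs.foldl (fun vs r => pvRulePass r vs) xs := by
  induction rs generalizing x xs with
  | nil => rfl
  | cons r rs ih =>
    rw [List.foldl_cons, List.foldl_cons, List.foldl_cons,
      show pvRulePass r (x :: xs) = pvStep r x :: pvRulePass r xs from rfl, ih]

-- the empty list is a fixed point of every pass fold
theorem pv_pass_nil (rs : List (String × String)) :
    rs.foldl (fun vs r => pvRulePass r vs) [] = [] := by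
  induction rs with
  | nil => rfl
  | cons r rs ih => rw [List.foldl_cons, show pvRulePass r [] = [] from rfl, ih]

-- per-element equality: B's five staged steps give A's chain result
theorem pvFixOne_eq (v : List (String × String)) :
    pvRules.reverse.foldl (fun v r => pvStep r v)
      ((PySem.Dict.insert (PySem.Dict.mk v) "fix_prompt"
        ("Review and fix " ++ PySem.Dict.getD (PySem.Dict.mk v) "type" "" ++ ". Test with SSL Labs: ssllabs.com/ssltest")).items)
    = pvFixOneA v := by
  unfold pvFixOneA pvRules
  set d := PySem.Dict.mk v with hd
  simp only [List.reverse_cons, List.reverse_nil, List.nil_append, List.cons_append,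
    List.foldl_cons, List.foldl_nil, pv_step]
  cases h1 : PySem.Str.isIn "Expired Certificate" (PySem.Dict.getD d "type" "") <;>
  cases h2 : PySem.Str.isIn "Weak Protocol" (PySem.Dict.getD d "type" "") <;>
  cases h3 : PySem.Str.isIn "Weak Cipher" (PySem.Dict.getD d "type" "") <;>
  cases h4 : PySem.Str.isIn "Self-Signed" (PySem.Dict.getD d "type" "") <;>
  simp [h1, h2, h3, h4]

-- ===== VERDICT (by name: the statement is the Claim_ definition above) =====
theorem pv_main (vulns : List (List (String × String))) :
    add_fix_prompts vulns = add_fix_prompts_alt vulns := by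
  unfold add_fix_prompts add_fix_prompts_alt
  induction vulns with
  | nil => rw [show pvDefaultPass [] = [] from rfl, pv_pass_nil]; rfl
  | cons v vs ih =>
    rw [show pvDefaultPass (v :: vs)
          = ((PySem.Dict.insert (PySem.Dict.mk v) "fix_prompt"
              ("Review and fix " ++ PySem.Dict.getD (PySem.Dict.mk v) "type" "" ++ ". Test with SSL Labs: ssllabs.com/ssltest")).items)
            :: pvDefaultPass vs from rfl,
      pv_pass_cons, pvFixOne_eq, List.map_cons, ih]

theorem add_fix_prompts_spec : Claim_equal_add_fix_prompts :=
  fun vulns _ => pv_main vulns
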